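-- pv_equiv track=rewrite | github.com/affteamgit/dataMatcher | app.py | generate_results
-- ===== SOURCE A (Python) =====
-- def generate_results(matched_list):
--     """Generate ready-to-copy results grouped by category"""
--     category_entities = {}
--
--     for match in matched_list:
--         category = match['Element Type']
--         entity_name = match['Matched To']
--
--         if entity_name:
--             if category not in category_entities:
--                 category_entities[category] = set()
--             category_entities[category].add(entity_name)
--
--     results = {}
--     for category, entities_set in category_entities.items():
--         if entities_set:
--             entities_list = sorted(list(entities_set))
--             results[category] = ", ".join(entities_list)
--
--     return results
-- ===== SOURCE B (Python) =====
-- def generate_results(matched_list):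
--     """Generate ready-to-copy results grouped by category"""
--     pairs = [(m['Element Type'], m['Matched To']) for m in matched_list if m['Matched To']]
--     return {c: ", ".join(sorted({n for k, n in pairs if k == c}))
--             for c in dict.fromkeys(c for c, _ in pairs)}
-- ===== Notes on version B (the rewrite author's own statement) =====
-- stated objective: simpler
-- what changed: B replaces A's incremental dict-of-sets loop plus a second dict-building loop with one flat comprehension extracting the truthy (category, name) pairs, dict.fromkeys for the category order, and a grouping dict-comprehension that collects, sorts and joins each category's names by scanning the flat pair list.
import Mathlib
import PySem

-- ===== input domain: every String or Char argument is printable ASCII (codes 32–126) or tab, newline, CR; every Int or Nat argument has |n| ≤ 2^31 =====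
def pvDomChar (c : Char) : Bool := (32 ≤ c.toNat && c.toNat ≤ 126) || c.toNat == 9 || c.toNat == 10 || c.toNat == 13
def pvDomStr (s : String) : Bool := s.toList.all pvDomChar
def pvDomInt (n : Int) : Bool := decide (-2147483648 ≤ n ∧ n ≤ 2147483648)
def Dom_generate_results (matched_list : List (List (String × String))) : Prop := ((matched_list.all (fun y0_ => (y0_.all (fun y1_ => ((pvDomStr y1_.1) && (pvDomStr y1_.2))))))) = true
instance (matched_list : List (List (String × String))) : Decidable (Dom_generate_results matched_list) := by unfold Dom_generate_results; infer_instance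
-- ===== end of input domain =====

-- B replaces A's incremental dict-of-sets with one flat comprehension of (category, name)
-- pairs plus a grouping comprehension (simpler decomposition, same results).

-- ===== PORT A =====
def generate_results (matched_list : List (List (String × String))) : List (String × String) :=
  let category_entities : PySem.Dict String (PySem.Set String) :=
    matched_list.foldl (fun ce m =>
      let category := (PySem.Dict.mk m).getD "Element Type" ""
      let entity_name := (PySem.Dict.mk m).getD "Matched To" ""
      if entity_name ≠ "" then
        let ce' := if ce.contains category then ce else ce.insert category PySem.Set.empty
        ce'.insert category (PySem.Set.add (ce'.getD category PySem.Set.empty) entity_name)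
      else ce) PySem.Dict.empty
  let results : PySem.Dict String String :=
    category_entities.items.foldl (fun res p =>
      if p.2 ≠ [] then
        res.insert p.1 (PySem.Str.join ", " (PySem.List.sorted p.2 (fun x => x) false))
      else res) PySem.Dict.empty
  results.items

-- ===== PORT B =====
def generate_results_alt (matched_list : List (List (String × String))) : List (String × String) :=
  let pairs : List (String × String) :=
    (matched_list.filter (fun m => (PySem.Dict.mk m).getD "Matched To" "" ≠ "")).map
      (fun m => ((PySem.Dict.mk m).getD "Element Type" "", (PySem.Dict.mk m).getD "Matched To" ""))
  (PySem.List.dedup (pairs.map Prod.fst)).map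
    (fun c => (c, PySem.Str.join ", " (PySem.List.sorted
        (PySem.Set.ofList ((pairs.filter (fun p => p.1 == c)).map Prod.snd)) (fun x => x) false)))

-- ===== PRECONDITION & SPEC =====
-- Pre_ excludes exactly the inputs where Python A raises KeyError: some entry dict
-- lacks the key 'Element Type' or the key 'Matched To'.
def Pre_generate_results (matched_list : List (List (String × String))) : Prop :=
  (matched_list.all (fun m =>
    (PySem.Dict.mk m).contains "Element Type" && (PySem.Dict.mk m).contains "Matched To")) = true
instance (matched_list : List (List (String × String))) : Decidable (Pre_generate_results matched_list) := by unfold Pre_generate_results; infer_instance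

def pvWitness_generate_results : (List (List (String × String))) :=
  [[("Element Type", "Person"), ("Matched To", "Alice")],
   [("Element Type", "Person"), ("Matched To", "")]]

def Spec_generate_results (matched_list : List (List (String × String))) (out : List (String × String)) : Prop := out = generate_results_alt matched_list
instance (matched_list : List (List (String × String))) (out : List (String × String)) : Decidable (Spec_generate_results matched_list out) := by unfold Spec_generate_results; infer_instance

-- ===== CLAIM (what is proved, stated in full; the proofs are below) =====
def Claim_equal_generate_results : Prop := ∀ (matched_list : List (List (String × String))), Dom_generate_results matched_list → Pre_generate_results matched_list → Spec_generate_results matched_list (generate_results matched_list)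

-- ===== LEMMAS AND PROOFS =====

-- the truthy (category, name) pairs, as B extracts them
def pvPairs (matched_list : List (List (String × String))) : List (String × String) :=
  (matched_list.filter (fun m => (PySem.Dict.mk m).getD "Matched To" "" ≠ "")).map
    (fun m => ((PySem.Dict.mk m).getD "Element Type" "", (PySem.Dict.mk m).getD "Matched To" ""))

-- one step of A's first loop, seen as a function of the extracted pair
def pvStep (d : PySem.Dict String (PySem.Set String)) (p : String × String) :
    PySem.Dict String (PySem.Set String) :=
  let d' := if d.contains p.1 then d else d.insert p.1 PySem.Set.empty
  d'.insert p.1 (PySem.Set.add (d'.getD p.1 PySem.Set.empty) p.2)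

-- the names recorded for category c
def pvNames (l : List (String × String)) (c : String) : PySem.Set String :=
  PySem.Set.ofList ((l.filter (fun p => p.1 == c)).map Prod.snd)

theorem pv_fold_pairs (matched_list : List (List (String × String)))
    (d : PySem.Dict String (PySem.Set String)) :
    matched_list.foldl (fun ce m =>
      let category := (PySem.Dict.mk m).getD "Element Type" ""
      let entity_name := (PySem.Dict.mk m).getD "Matched To" ""
      if entity_name ≠ "" then
        let ce' := if ce.contains category then ce else ce.insert category PySem.Set.empty
        ce'.insert category (PySem.Set.add (ce'.getD category PySem.Set.empty) entity_name)
      else ce) d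
    = (pvPairs matched_list).foldl pvStep d := by
  induction matched_list generalizing d with
  | nil => rfl
  | cons m rest ih =>
      by_cases h : (PySem.Dict.mk m).getD "Matched To" "" = ""
      · have hp : pvPairs (m :: rest) = pvPairs rest := by
          simp [pvPairs, h]
        rw [List.foldl_cons, hp, ← ih]
        congr 1
        simp [h]
      · have hp : pvPairs (m :: rest)
            = ((PySem.Dict.mk m).getD "Element Type" "",
               (PySem.Dict.mk m).getD "Matched To" "") :: pvPairs rest := by
          simp [pvPairs, h]
        rw [List.foldl_cons, hp, List.foldl_cons, ← ih]
        congr 1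
        simp [pvStep, h]

theorem pv_ofList_append (xs : List String) (x : String) :
    PySem.Set.ofList (xs ++ [x]) = PySem.Set.add (PySem.Set.ofList xs) x := by
  simp [PySem.Set.ofList_eq_foldl, List.foldl_append]

theorem pv_names_append_self (l : List (String × String)) (p : String × String) :
    pvNames (l ++ [p]) p.1 = PySem.Set.add (pvNames l p.1) p.2 := by
  simp [pvNames, List.filter_append, pv_ofList_append]

theorem pv_names_append_ne (l : List (String × String)) (p : String × String) (c : String)
    (h : c ≠ p.1) : pvNames (l ++ [p]) c = pvNames l c := by
  simp [pvNames, List.filter_append, (by simpa using h.symm : ¬ p.1 = c)]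

theorem pv_names_of_not_mem (l : List (String × String)) (c : String)
    (h : c ∉ l.map Prod.fst) : pvNames l c = [] := by
  have : l.filter (fun p => p.1 == c) = [] := by
    rw [List.filter_eq_nil_iff]
    intro p hp hbeq
    exact h (List.mem_map.mpr ⟨p, hp, by simpa using hbeq⟩)
  simp [pvNames, this]

theorem pv_dedup_append (xs : List String) (x : String) :
    PySem.List.dedup (xs ++ [x])
      = if x ∈ xs then PySem.List.dedup xs else PySem.List.dedup xs ++ [x] := by
  simp only [PySem.List.dedup_eq_ofList, PySem.Set.ofList_append_singleton,
    PySem.Set.add_eq_ite, PySem.Set.mem_ofList]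

theorem pv_items_loop (l : List (String × String)) :
    (l.foldl pvStep PySem.Dict.empty).items
      = (PySem.List.dedup (l.map Prod.fst)).map (fun c => (c, pvNames l c)) := by
  induction l using List.reverseRecOn with
  | nil => rfl
  | append_singleton l p ih =>
      rw [List.foldl_append, List.foldl_cons, List.foldl_nil]
      set D := l.foldl pvStep PySem.Dict.empty with hD
      have hkeys : D.keys = PySem.List.dedup (l.map Prod.fst) := by
        show D.items.map Prod.fst = _
        rw [ih, List.map_map]
        simp [Function.comp_def]
      have hnd : D.keys.Nodup := by rw [hkeys]; exact PySem.List.nodup_dedup _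
      have hcontains : D.contains p.1 = decide (p.1 ∈ l.map Prod.fst) := by
        rw [PySem.Dict.contains_eq_decide_mem_keys, hkeys]
        simp
      by_cases hc : p.1 ∈ l.map Prod.fst
      · have hct : D.contains p.1 = true := by simp [hcontains, hc]
        have hmem : (p.1, pvNames l p.1) ∈ D.items := by
          rw [ih]
          exact List.mem_map.mpr ⟨p.1, by simpa [PySem.List.mem_dedup] using hc, rfl⟩
        have hget : D.getD p.1 PySem.Set.empty = pvNames l p.1 :=
          PySem.Dict.getD_of_mem_items D hmem hnd PySem.Set.empty
        rw [List.map_append]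
        simp only [List.map_cons, List.map_nil]
        rw [pv_dedup_append]
        simp only [hc, if_pos]
        rw [pvStep]
        simp only [hct, if_pos, hget]
        rw [PySem.Dict.items_insert_of_contains D _ hct, ih, List.map_map]
        apply List.map_congr_left
        intro c hcd
        by_cases hcc : c = p.1
        · subst hcc
          simp [pv_names_append_self]
        · simp [Function.comp, (by simpa using hcc : ¬ c = p.1), pv_names_append_ne l p c hcc]
      · have hcf : D.contains p.1 = false := by simp [hcontains, hc]
        have hstep : pvStep D p = D.insert p.1 [p.2] := by
          rw [pvStep]
          simp only [hcf, Bool.false_eq_true, reduceIte]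
          rw [PySem.Dict.getD_insert_self, PySem.Dict.insert_insert_self]
          rfl
        have hcf2 : (D.insert p.1 [p.2]).items = D.items ++ [(p.1, [p.2])] := by
          exact PySem.Dict.items_insert_of_not_contains _ _ hcf
        rw [hstep, hcf2, ih, List.map_append]
        simp only [List.map_cons, List.map_nil]
        rw [pv_dedup_append]
        simp only [hc, reduceIte, List.map_append, List.map_cons, List.map_nil]
        congr 1
        · apply List.map_congr_left
          intro c hcd
          have hcl : c ∈ l.map Prod.fst := by
            simpa [PySem.List.mem_dedup] using hcd
          have : c ≠ p.1 := fun h => hc (h ▸ hcl)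
          rw [pv_names_append_ne l p c this]
        · have : pvNames (l ++ [p]) p.1 = [p.2] := by
            rw [pv_names_append_self, pv_names_of_not_mem l p.1 hc]
            rfl
          simp [this]

theorem pv_names_ne_nil (l : List (String × String)) (c : String)
    (h : c ∈ l.map Prod.fst) : pvNames l c ≠ [] := by
  obtain ⟨q, hq, rfl⟩ := List.mem_map.mp h
  have hqf : q ∈ l.filter (fun p => p.1 == q.1) := List.mem_filter.mpr ⟨hq, by simp⟩
  have : q.2 ∈ pvNames l q.1 := by
    rw [pvNames, PySem.Set.mem_ofList]
    exact List.mem_map.mpr ⟨q, hqf, rfl⟩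
  exact List.ne_nil_of_mem this

theorem generate_results_spec : Claim_equal_generate_results := by
  intro ml _dom _pre
  show ((ml.foldl (fun ce m =>
      let category := (PySem.Dict.mk m).getD "Element Type" ""
      let entity_name := (PySem.Dict.mk m).getD "Matched To" ""
      if entity_name ≠ "" then
        let ce' := if ce.contains category then ce else ce.insert category PySem.Set.empty
        ce'.insert category (PySem.Set.add (ce'.getD category PySem.Set.empty) entity_name)
      else ce) PySem.Dict.empty).items.foldl (fun res p =>
        if p.2 ≠ [] then
          res.insert p.1 (PySem.Str.join ", " (PySem.List.sorted p.2 (fun x => x) false))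
        else res) PySem.Dict.empty).items
    = (PySem.List.dedup ((pvPairs ml).map Prod.fst)).map
        (fun c => (c, PySem.Str.join ", " (PySem.List.sorted
          (PySem.Set.ofList (((pvPairs ml).filter (fun p => p.1 == c)).map Prod.snd)) (fun x => x) false)))
  rw [pv_fold_pairs, pv_items_loop]
  set cats := PySem.List.dedup ((pvPairs ml).map Prod.fst) with hcats
  set G := cats.map (fun c => (c, pvNames (pvPairs ml) c)) with hG
  have hif : G.foldl (fun res p =>
      if p.2 ≠ [] then
        res.insert p.1 (PySem.Str.join ", " (PySem.List.sorted p.2 (fun x => x) false))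
      else res) PySem.Dict.empty
    = G.foldl (fun res p =>
        res.insert p.1 (PySem.Str.join ", " (PySem.List.sorted p.2 (fun x => x) false)))
        PySem.Dict.empty := by
    apply PySem.List.foldl_congr_mem
    intro res q hqG
    obtain ⟨c, hcc, rfl⟩ := List.mem_map.mp hqG
    have : pvNames (pvPairs ml) c ≠ [] :=
      pv_names_ne_nil _ _ (by simpa [hcats, PySem.List.mem_dedup] using hcc)
    simp [this]
  rw [hif]
  have hfresh : (G.foldl (fun res p =>
        res.insert p.1 (PySem.Str.join ", " (PySem.List.sorted p.2 (fun x => x) false)))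
        PySem.Dict.empty).items
      = PySem.Dict.empty.items
        ++ G.map (fun p => (p.1, PySem.Str.join ", " (PySem.List.sorted p.2 (fun x => x) false))) := by
    apply PySem.Dict.items_foldl_insert_fresh
    · intro a _; exact PySem.Dict.contains_empty _
    · rw [hG, List.map_map]
      have hmapid : List.map (Prod.fst ∘ fun c => (c, pvNames (pvPairs ml) c)) cats = cats := by
        simp [Function.comp_def]
      rw [hmapid, hcats]
      exact PySem.List.nodup_dedup _
  rw [hfresh, hG, List.map_map]
  simp [pvPairs, pvNames, Function.comp_def]
  rfl
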